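-- pv_equiv track=rewrite | github.com/s5unnyjjj/Algorithm | 02_Programmers/015_Lv2_롤케이크자르기.py | solution
-- ===== SOURCE A (Python) =====
-- def solution(topping):
--     answer = []
--     right, left = 0, len(topping) - 1
--
--     while right < left:
--         mid = (right + left) // 2
--         rt = set(topping[:mid])
--         lt = set(topping[mid:])
--
--         if len(rt) == len(lt):
--             if mid in answer:
--                 break
--             else:
--                 answer.append(mid)
--                 if mid > len(topping)//2:
--                     left = mid
--                 else:
--                     right = mid + 1
--         elif len(rt) < len(lt):
--             right = mid + 1
--         else:
--             left = mid
--
--     return len(answer)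
-- ===== SOURCE B (Python) =====
-- def solution(topping):
--     # Precompute prefix/suffix distinct counts once (O(n)), then run the
--     # binary search with O(1) lookups instead of rebuilding two sets per step.
--     n = len(topping)
--     pre = [0]
--     seen = set()
--     for t in topping:
--         seen.add(t)
--         pre.append(len(seen))
--     rev = [0]
--     seen = set()
--     for t in reversed(topping):
--         seen.add(t)
--         rev.append(len(seen))
--     suf = rev[::-1]  # suf[i] = number of distinct toppings in topping[i:]
--
--     answer = []
--     right, left = 0, n - 1
--     while right < left:
--         mid = (right + left) // 2
--         if pre[mid] == suf[mid]:
--             if mid in answer: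
--                 break
--             answer.append(mid)
--             if mid > n // 2:
--                 left = mid
--             else:
--                 right = mid + 1
--         elif pre[mid] < suf[mid]:
--             right = mid + 1
--         else:
--             left = mid
--     return len(answer)
-- ===== Notes on version B (the rewrite author's own statement) =====
-- stated objective: faster
-- what changed: B precomputes prefix- and suffix-distinct-count arrays in two linear passes, so the binary-search loop does O(1) array lookups instead of rebuilding two sets (an O(n) scan) at every iteration.
import Mathlib
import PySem

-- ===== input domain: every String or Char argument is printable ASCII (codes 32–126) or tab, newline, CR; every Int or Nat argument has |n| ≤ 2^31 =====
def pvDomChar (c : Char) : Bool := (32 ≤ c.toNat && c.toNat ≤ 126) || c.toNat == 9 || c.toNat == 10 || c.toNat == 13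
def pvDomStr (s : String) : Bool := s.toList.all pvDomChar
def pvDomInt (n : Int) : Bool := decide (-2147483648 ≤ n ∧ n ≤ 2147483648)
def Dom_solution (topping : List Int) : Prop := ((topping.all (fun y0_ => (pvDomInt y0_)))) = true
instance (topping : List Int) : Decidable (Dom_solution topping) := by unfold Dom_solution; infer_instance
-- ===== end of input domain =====

-- B precomputes the prefix/suffix distinct-count arrays once, so the binary-search loop
-- does O(1) lookups instead of rebuilding two sets per iteration (objective: faster).

-- midpoint bounds, cited by the ports' decreasing_by
theorem pvMidBounds {r l : Int} (h : r < l) :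
    r ≤ PySem.Int.floordiv (r + l) 2 ∧ PySem.Int.floordiv (r + l) 2 < l := by
  rw [PySem.Int.floordiv_eq_ediv_of_pos (by norm_num)]
  omega

-- ===== PORT A =====
def solutionLoop (topping : List Int) (answer : List Int) (right left : Int) : Int :=
  if h : right < left then
    let mid := PySem.Int.floordiv (right + left) 2
    let rt : PySem.Set Int := PySem.Set.ofList (PySem.List.slice topping none (some mid))
    let lt : PySem.Set Int := PySem.Set.ofList (PySem.List.slice topping (some mid) none)
    if rt.length = lt.length then
      if mid ∈ answer then (answer.length : Int)
      else
        if mid > PySem.Int.floordiv (topping.length : Int) 2 then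
          solutionLoop topping (answer ++ [mid]) right mid
        else
          solutionLoop topping (answer ++ [mid]) (mid + 1) left
    else if rt.length < lt.length then
      solutionLoop topping answer (mid + 1) left
    else
      solutionLoop topping answer right mid
  else (answer.length : Int)
termination_by (left - right).toNat
decreasing_by
  all_goals (have h2 := pvMidBounds h; omega)

def solution (topping : List Int) : Int :=
  solutionLoop topping [] 0 ((topping.length : Int) - 1)

-- ===== PORT B =====
def bStep (st : PySem.Set Int × List Int) (t : Int) : PySem.Set Int × List Int :=
  let s := PySem.Set.add st.1 t
  (s, st.2 ++ [(s.length : Int)])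

def buildCounts (topping : List Int) : List Int :=
  (topping.foldl bStep (PySem.Set.empty, [(0 : Int)])).2

def altLoop (n : Int) (pre suf : List Int) (answer : List Int) (right left : Int) : Int :=
  if h : right < left then
    let mid := PySem.Int.floordiv (right + left) 2
    if PySem.List.pyGetD pre mid 0 = PySem.List.pyGetD suf mid 0 then
      if mid ∈ answer then (answer.length : Int)
      else
        if mid > PySem.Int.floordiv n 2 then
          altLoop n pre suf (answer ++ [mid]) right mid
        else
          altLoop n pre suf (answer ++ [mid]) (mid + 1) left
    else if PySem.List.pyGetD pre mid 0 < PySem.List.pyGetD suf mid 0 then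
      altLoop n pre suf answer (mid + 1) left
    else
      altLoop n pre suf answer right mid
  else (answer.length : Int)
termination_by (left - right).toNat
decreasing_by
  all_goals (have h2 := pvMidBounds h; omega)

def solution_alt (topping : List Int) : Int :=
  let n : Int := (topping.length : Int)
  let pre := buildCounts topping
  let suf := (buildCounts topping.reverse).reverse
  altLoop n pre suf [] 0 (n - 1)

-- ===== PRECONDITION & SPEC =====
def Spec_solution (topping : List Int) (out : Int) : Prop := out = solution_alt topping
instance (topping : List Int) (out : Int) : Decidable (Spec_solution topping out) := by unfold Spec_solution; infer_instance

-- ===== CLAIM (what is proved, stated in full; the proofs are below) =====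
def Claim_equal_solution : Prop := ∀ (topping : List Int), Dom_solution topping → Spec_solution topping (solution topping)

-- ===== LEMMAS AND PROOFS =====

-- the list of running distinct counts produced by B's scan, starting from set s
def pvCounts (s : PySem.Set Int) : List Int → List Int
  | [] => []
  | t :: r => ((PySem.Set.add s t).length : Int) :: pvCounts (PySem.Set.add s t) r

theorem pvCounts_length (xs : List Int) : ∀ s : PySem.Set Int, (pvCounts s xs).length = xs.length := by
  induction xs with
  | nil => intro s; rfl
  | cons t r ih => intro s; simp [pvCounts, ih]

theorem foldl_bStep (xs : List Int) : ∀ (s : PySem.Set Int) (acc : List Int),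
    (xs.foldl bStep (s, acc)).2 = acc ++ pvCounts s xs := by
  induction xs with
  | nil => intro s acc; simp [pvCounts]
  | cons t r ih => intro s acc; simp [List.foldl, bStep, pvCounts, ih]

theorem buildCounts_eq (xs : List Int) : buildCounts xs = (0 : Int) :: pvCounts PySem.Set.empty xs := by
  simp [buildCounts, foldl_bStep]

theorem buildCounts_length (xs : List Int) : (buildCounts xs).length = xs.length + 1 := by
  simp [buildCounts_eq, pvCounts_length]

theorem pvCounts_getD (xs : List Int) : ∀ (s : PySem.Set Int) (k : Nat), k < xs.length →
    (pvCounts s xs).getD k 0 = ((PySem.Set.update s (xs.take (k + 1))).length : Int) := by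
  induction xs with
  | nil => intro s k hk; simp at hk
  | cons t r ih =>
    intro s k hk
    cases k with
    | zero => simp [pvCounts, PySem.Set.update, List.foldl]
    | succ k =>
      simp only [pvCounts, List.getD_cons_succ, List.take_succ_cons]
      rw [ih _ k (by simpa using hk)]
      simp [PySem.Set.update, List.foldl]

theorem pre_getD (xs : List Int) (k : Nat) (hk : k ≤ xs.length) :
    (buildCounts xs).getD k 0 = ((PySem.Set.ofList (xs.take k)).length : Int) := by
  cases k with
  | zero => simp [buildCounts_eq]
  | succ k =>
    rw [buildCounts_eq]
    simp only [List.getD_cons_succ]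
    rw [pvCounts_getD _ _ k (by omega), PySem.Set.ofList_eq_foldl]
    rfl

theorem ofList_reverse_length (xs : List Int) :
    (PySem.Set.ofList xs.reverse).length = (PySem.Set.ofList xs).length := by
  have hperm : List.Perm (PySem.Set.ofList xs.reverse) (PySem.Set.ofList xs) := by
    rw [List.perm_ext_iff_of_nodup (PySem.Set.nodup_ofList _) (PySem.Set.nodup_ofList _)]
    intro a
    simp [PySem.Set.mem_ofList]
  exact hperm.length_eq

theorem suf_getD (xs : List Int) (k : Nat) (hk : k ≤ xs.length) :
    ((buildCounts xs.reverse).reverse).getD k 0 = ((PySem.Set.ofList (xs.drop k)).length : Int) := by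
  have hlen : (buildCounts xs.reverse).length = xs.length + 1 := by
    simp [buildCounts_length]
  have hk' : k < (buildCounts xs.reverse).reverse.length := by simp [hlen]; omega
  have hk2 : xs.length - k < (buildCounts xs.reverse).length := by omega
  have h2 : (buildCounts xs.reverse).getD (xs.length - k) 0
      = ((PySem.Set.ofList (xs.reverse.take (xs.length - k))).length : Int) :=
    pre_getD _ _ (by simp)
  rw [List.getD_eq_getElem _ _ hk2] at h2
  have hidx : (buildCounts xs.reverse).length - 1 - k = xs.length - k := by omega
  rw [List.getD_eq_getElem _ _ hk', List.getElem_reverse]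
  simp only [hidx]
  rw [h2]
  have h3 : xs.reverse.take (xs.length - k) = (xs.drop k).reverse := by
    rw [← List.reverse_drop]
  rw [h3, ofList_reverse_length]

theorem loop_eq (xs : List Int) (right left : Int) (answer : List Int)
    (hr : 0 ≤ right) (hl : left ≤ (xs.length : Int) - 1) :
    solutionLoop xs answer right left
      = altLoop (xs.length : Int) (buildCounts xs) ((buildCounts xs.reverse).reverse) answer right left := by
  unfold solutionLoop altLoop
  by_cases h : right < left
  · simp only [dif_pos h]
    obtain ⟨h1, h2⟩ := pvMidBounds h
    set mid := PySem.Int.floordiv (right + left) 2 with hmid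
    have hm0 : 0 ≤ mid := le_trans hr h1
    have hmn : mid.toNat ≤ xs.length := by omega
    have hcast : mid = ((mid.toNat : Nat) : Int) := by omega
    have htn : ((mid.toNat : Nat) : Int).toNat = mid.toNat := Int.toNat_natCast _
    have hp : PySem.List.pyGetD (buildCounts xs) mid 0
        = ((PySem.Set.ofList (xs.take mid.toNat)).length : Int) := by
      rw [hcast, htn, PySem.List.pyGetD_natCast, pre_getD _ _ hmn]
    have hs : PySem.List.pyGetD ((buildCounts xs.reverse).reverse) mid 0
        = ((PySem.Set.ofList (xs.drop mid.toNat)).length : Int) := by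
      rw [hcast, htn, PySem.List.pyGetD_natCast, suf_getD _ _ hmn]
    rw [PySem.List.slice_to _ hm0, PySem.List.slice_from _ hm0, hp, hs]
    by_cases heq : (PySem.Set.ofList (xs.take mid.toNat)).length = (PySem.Set.ofList (xs.drop mid.toNat)).length
    · simp only [heq, if_pos]
      by_cases hmem : mid ∈ answer
      · simp [hmem]
      · simp only [hmem, if_false]
        by_cases hgt : mid > PySem.Int.floordiv ((xs.length : Nat) : Int) 2
        · simp only [hgt, if_pos]
          exact loop_eq xs right mid (answer ++ [mid]) hr (by omega)
        · simp only [hgt, if_false]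
          exact loop_eq xs (mid + 1) left (answer ++ [mid]) (by omega) hl
    · have hne : ¬ ((PySem.Set.ofList (xs.take mid.toNat)).length : Int)
          = ((PySem.Set.ofList (xs.drop mid.toNat)).length : Int) := by
        exact_mod_cast heq
      simp only [heq, hne, if_false]
      by_cases hlt : (PySem.Set.ofList (xs.take mid.toNat)).length < (PySem.Set.ofList (xs.drop mid.toNat)).length
      · have hlt' : ((PySem.Set.ofList (xs.take mid.toNat)).length : Int)
            < ((PySem.Set.ofList (xs.drop mid.toNat)).length : Int) := by exact_mod_cast hlt
        simp only [hlt, hlt', if_pos]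
        exact loop_eq xs (mid + 1) left answer (by omega) hl
      · have hlt' : ¬ ((PySem.Set.ofList (xs.take mid.toNat)).length : Int)
            < ((PySem.Set.ofList (xs.drop mid.toNat)).length : Int) := by exact_mod_cast hlt
        simp only [hlt, hlt', if_false]
        exact loop_eq xs right mid answer hr (by omega)
  · simp only [dif_neg h]
termination_by (left - right).toNat
decreasing_by
  all_goals omega

-- ===== VERDICT (by name: the statement is the Claim_ definition above) =====
theorem solution_spec : Claim_equal_solution := by
  intro topping _
  unfold Spec_solution solution solution_alt
  exact loop_eq topping 0 ((topping.length : Int) - 1) [] (by omega) (by omega)
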